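-- pv_equiv track=rewrite | github.com/chillbot-io/privplay | privplay/engine/rules/checksum_rules.py | validate_ssn
-- ===== SOURCE A (Python) =====
-- def validate_ssn(ssn: str) -> bool:
--     """
--     Validate SSN format and area number.
--     Invalid: 000, 666, 900-999 in area (first 3 digits)
--     Invalid: 00 in group (middle 2 digits)
--     Invalid: 0000 in serial (last 4 digits)
--     """
--     digits = ''.join(d for d in ssn if d.isdigit())
--     if len(digits) != 9:
--         return False
--
--     area = int(digits[:3])
--     group = int(digits[3:5])
--     serial = int(digits[5:])
--
--     # Invalid area numbers
--     if area == 0 or area == 666 or area >= 900: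
--         return False
--     # Invalid group
--     if group == 0:
--         return False
--     # Invalid serial
--     if serial == 0:
--         return False
--
--     return True
-- ===== SOURCE B (Python) =====
-- def validate_ssn(ssn: str) -> bool:
--     """
--     Streaming single-pass SSN validator: no digit string is built and no
--     slicing/int() parsing is done; flags for the forbidden patterns are
--     maintained while scanning the input once.
--     """
--     n = 0
--     area000 = area666 = group00 = serial0000 = True
--     area9 = False
--     for ch in ssn:
--         if not ch.isdigit():
--             continue
--         if n >= 9:            # a 10th digit: cannot be a valid SSN
--             return False
--         if n < 3:
--             area000 = area000 and ch == '0'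
--             area666 = area666 and ch == '6'
--             if n == 0:
--                 area9 = ch == '9'
--         elif n < 5:
--             group00 = group00 and ch == '0'
--         else:
--             serial0000 = serial0000 and ch == '0'
--         n += 1
--     return n == 9 and not (area000 or area666 or area9 or group00 or serial0000)
-- ===== Notes on version B (the rewrite author's own statement) =====
-- stated objective: alternative
-- what changed: B replaces A's staged extract-join-slice-int pipeline with a single streaming pass over the raw string that counts digits and maintains boolean flags for the forbidden area/group/serial patterns, early-exiting on a tenth digit.
import Mathlib
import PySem

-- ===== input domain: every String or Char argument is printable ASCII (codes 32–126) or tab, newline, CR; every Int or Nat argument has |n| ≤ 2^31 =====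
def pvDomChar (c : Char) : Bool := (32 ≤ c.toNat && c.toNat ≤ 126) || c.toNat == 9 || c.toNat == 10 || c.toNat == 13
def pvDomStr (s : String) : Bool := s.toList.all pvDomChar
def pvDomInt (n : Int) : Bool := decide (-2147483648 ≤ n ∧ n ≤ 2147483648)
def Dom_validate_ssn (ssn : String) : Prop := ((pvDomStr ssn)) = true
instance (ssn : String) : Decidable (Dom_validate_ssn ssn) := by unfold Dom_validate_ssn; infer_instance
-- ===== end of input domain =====

-- B is a streaming single-pass validator (digit counter + forbidden-pattern flags, early exit on a 10th digit) instead of A's extract/slice/int() pipeline; alternative decomposition, same O(n) cost.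


-- ===== PORT A =====
-- int(digits[:3]) etc. cannot raise here (the slices are non-empty all-digit strings), so `.getD 0` is never the default.
def validate_ssn (ssn : String) : Bool :=
  let digits := ssn.toList.filter PySem.Chars.isdigit
  if digits.length ≠ 9 then false
  else
    let area := (PySem.Int.ofChars? (PySem.List.slice digits none (some 3))).getD 0
    let group := (PySem.Int.ofChars? (PySem.List.slice digits (some 3) (some 5))).getD 0
    let serial := (PySem.Int.ofChars? (PySem.List.slice digits (some 5) none)).getD 0
    if area = 0 ∨ area = 666 ∨ 900 ≤ area then false
    else if group = 0 then false
    else if serial = 0 then false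
    else true

-- ===== PORT B =====
-- the for-loop of Source B with its early `return False`, as structural recursion on the characters
def ssnLoop : List Char → Nat → Bool → Bool → Bool → Bool → Bool → Bool
  | [], n, a0, a6, a9, g0, s0 => n == 9 && !(a0 || a6 || a9 || g0 || s0)
  | c :: rest, n, a0, a6, a9, g0, s0 =>
    if ¬ PySem.Chars.isdigit c then ssnLoop rest n a0 a6 a9 g0 s0
    else if 9 ≤ n then false
    else if n < 3 then
      ssnLoop rest (n + 1) (a0 && c == '0') (a6 && c == '6')
        (if n == 0 then c == '9' else a9) g0 s0
    else if n < 5 then ssnLoop rest (n + 1) a0 a6 a9 (g0 && c == '0') s0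
    else ssnLoop rest (n + 1) a0 a6 a9 g0 (s0 && c == '0')

def validate_ssn_alt (ssn : String) : Bool :=
  ssnLoop ssn.toList 0 true true false true true

-- ===== PRECONDITION & SPEC =====
def Spec_validate_ssn (ssn : String) (out : Bool) : Prop := out = validate_ssn_alt ssn
instance (ssn : String) (out : Bool) : Decidable (Spec_validate_ssn ssn out) := by unfold Spec_validate_ssn; infer_instance

-- ===== CLAIM (what is proved, stated in full; the proofs are below) =====
def Claim_equal_validate_ssn : Prop := ∀ (ssn : String), Dom_validate_ssn ssn → Spec_validate_ssn ssn (validate_ssn ssn)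

-- ===== LEMMAS AND PROOFS =====

def DCL : List Char := ['0','1','2','3','4','5','6','7','8','9']

theorem mem_DCL (c : Char) (h : PySem.Chars.isdigit c = true) : c ∈ DCL := by
  simp only [PySem.Chars.isdigit, Bool.and_eq_true, decide_eq_true_eq, Char.le_def,
    UInt32.le_iff_toNat_le] at h
  have h1 : 48 ≤ c.toNat := h.1
  have h2 : c.toNat ≤ 57 := h.2
  have hc : Char.ofNat c.toNat = c := Char.ofNat_toNat c
  interval_cases hn : c.toNat <;> rw [← hc] <;> decide

theorem nine_chars (ds : List Char) (h : ds.length = 9) :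
    ∃ c1 c2 c3 c4 c5 c6 c7 c8 c9, ds = [c1,c2,c3,c4,c5,c6,c7,c8,c9] := by
  rcases ds with _ | ⟨c1, ds⟩; · simp at h
  rcases ds with _ | ⟨c2, ds⟩; · simp at h
  rcases ds with _ | ⟨c3, ds⟩; · simp at h
  rcases ds with _ | ⟨c4, ds⟩; · simp at h
  rcases ds with _ | ⟨c5, ds⟩; · simp at h
  rcases ds with _ | ⟨c6, ds⟩; · simp at h
  rcases ds with _ | ⟨c7, ds⟩; · simp at h
  rcases ds with _ | ⟨c8, ds⟩; · simp at h
  rcases ds with _ | ⟨c9, ds⟩; · simp at h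
  rcases ds with _ | ⟨c10, ds⟩
  · exact ⟨c1,c2,c3,c4,c5,c6,c7,c8,c9, rfl⟩
  · simp at h

-- the loop ignores non-digit characters: it computes the same as on the filtered list
theorem ssnLoop_filter (cs : List Char) : ∀ (n : Nat) (a0 a6 a9 g0 s0 : Bool),
    ssnLoop cs n a0 a6 a9 g0 s0 = ssnLoop (cs.filter PySem.Chars.isdigit) n a0 a6 a9 g0 s0 := by
  induction cs with
  | nil => intro n a0 a6 a9 g0 s0; rfl
  | cons c rest ih =>
    intro n a0 a6 a9 g0 s0
    by_cases hd : PySem.Chars.isdigit c = true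
    · simp only [List.filter_cons, hd, if_pos, ssnLoop, not_true, ite_false]
      split_ifs <;> first | rfl | apply ih
    · simp only [List.filter_cons, hd, Bool.false_eq_true, if_false]
      rw [ssnLoop, if_pos (by simp [hd])]
      apply ih

-- on an all-digit list whose length does not bring the count to 9, the loop returns false
theorem ssnLoop_ne9 (ds : List Char) : ∀ (n : Nat) (a0 a6 a9 g0 s0 : Bool),
    (∀ c ∈ ds, PySem.Chars.isdigit c = true) → n + ds.length ≠ 9 →
    ssnLoop ds n a0 a6 a9 g0 s0 = false := by
  induction ds with
  | nil =>
    intro n a0 a6 a9 g0 s0 _ hne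
    simp only [List.length_nil, Nat.add_zero] at hne
    simp [ssnLoop, hne]
  | cons c rest ih =>
    intro n a0 a6 a9 g0 s0 hall hne
    have hd : PySem.Chars.isdigit c = true := hall c (by simp)
    have hall' : ∀ x ∈ rest, PySem.Chars.isdigit x = true := fun x hx => hall x (by simp [hx])
    have hne' : (n + 1) + rest.length ≠ 9 := by
      simp only [List.length_cons] at hne; omega
    rw [ssnLoop, if_neg (by simp [hd])]
    split_ifs with h1 h2 h3
    · rfl
    all_goals exact ih (n+1) _ _ _ _ _ hall' hne'

set_option maxHeartbeats 4000000 in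
theorem areaB : (DCL.all fun a => DCL.all fun b => DCL.all fun c =>
    ((((PySem.Int.ofChars? [a,b,c]).getD 0 == 0) || ((PySem.Int.ofChars? [a,b,c]).getD 0 == 666) ||
       decide (900 ≤ (PySem.Int.ofChars? [a,b,c]).getD 0))
     == ((a == '0' && b == '0' && c == '0') || (a == '6' && b == '6' && c == '6') || (a == '9')))) = true := by decide

set_option maxHeartbeats 1000000 in
theorem groupB : (DCL.all fun a => DCL.all fun b =>
    (((PySem.Int.ofChars? [a,b]).getD 0 == 0) == (a == '0' && b == '0'))) = true := by decide

set_option maxHeartbeats 4000000 in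
theorem serialB : (DCL.all fun a => DCL.all fun b => DCL.all fun c => DCL.all fun d =>
    (((PySem.Int.ofChars? [a,b,c,d]).getD 0 == 0) == (a == '0' && b == '0' && c == '0' && d == '0'))) = true := by decide

-- ===== VERDICT (by name: the statement is the Claim_ definition above) =====
set_option maxHeartbeats 2000000 in
theorem validate_ssn_spec : Claim_equal_validate_ssn := by
  intro ssn _
  unfold Spec_validate_ssn validate_ssn validate_ssn_alt
  rw [ssnLoop_filter]
  have hdigit : ∀ c ∈ ssn.toList.filter PySem.Chars.isdigit, PySem.Chars.isdigit c = true :=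
    fun c hc => List.of_mem_filter hc
  by_cases h9 : (ssn.toList.filter PySem.Chars.isdigit).length = 9
  · obtain ⟨c1,c2,c3,c4,c5,c6,c7,c8,c9, hE⟩ := nine_chars _ h9
    rw [hE] at hdigit ⊢
    have d1 := hdigit c1 (by simp); have d2 := hdigit c2 (by simp); have d3 := hdigit c3 (by simp)
    have d4 := hdigit c4 (by simp); have d5 := hdigit c5 (by simp); have d6 := hdigit c6 (by simp)
    have d7 := hdigit c7 (by simp); have d8 := hdigit c8 (by simp); have d9 := hdigit c9 (by simp)
    have m1 := mem_DCL c1 d1; have m2 := mem_DCL c2 d2; have m3 := mem_DCL c3 d3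
    have m4 := mem_DCL c4 d4; have m5 := mem_DCL c5 d5; have m6 := mem_DCL c6 d6
    have m7 := mem_DCL c7 d7; have m8 := mem_DCL c8 d8; have m9 := mem_DCL c9 d9
    have hsl1 : PySem.List.slice [c1,c2,c3,c4,c5,c6,c7,c8,c9] none (some 3) = [c1,c2,c3] := by
      rw [PySem.List.slice_to] <;> first | rfl | norm_num
    have hsl2 : PySem.List.slice [c1,c2,c3,c4,c5,c6,c7,c8,c9] (some 3) (some 5) = [c4,c5] := by
      rw [PySem.List.slice_toNat] <;> first | rfl | norm_num
    have hsl3 : PySem.List.slice [c1,c2,c3,c4,c5,c6,c7,c8,c9] (some 5) none = [c6,c7,c8,c9] := by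
      rw [PySem.List.slice_from] <;> first | rfl | norm_num
    have hA := List.all_eq_true.mp (List.all_eq_true.mp (List.all_eq_true.mp areaB c1 m1) c2 m2) c3 m3
    have hG := List.all_eq_true.mp (List.all_eq_true.mp groupB c4 m4) c5 m5
    have hS := List.all_eq_true.mp (List.all_eq_true.mp (List.all_eq_true.mp (List.all_eq_true.mp serialB c6 m6) c7 m7) c8 m8) c9 m9
    rw [beq_iff_eq] at hA hG hS
    -- evaluate the loop on the nine digits
    have hB : ssnLoop [c1,c2,c3,c4,c5,c6,c7,c8,c9] 0 true true false true true
        = !((c1 == '0' && c2 == '0' && c3 == '0') || (c1 == '6' && c2 == '6' && c3 == '6')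
            || (c1 == '9') || (c4 == '0' && c5 == '0')
            || (c6 == '0' && c7 == '0' && c8 == '0' && c9 == '0')) := by
      rw [ssnLoop, if_neg (by simp [d1]), if_neg (by norm_num), if_pos (by norm_num), if_pos (by decide)]
      rw [ssnLoop, if_neg (by simp [d2]), if_neg (by norm_num), if_pos (by norm_num), if_neg (by decide)]
      rw [ssnLoop, if_neg (by simp [d3]), if_neg (by norm_num), if_pos (by norm_num), if_neg (by decide)]
      rw [ssnLoop, if_neg (by simp [d4]), if_neg (by norm_num), if_neg (by norm_num), if_pos (by norm_num)]
      rw [ssnLoop, if_neg (by simp [d5]), if_neg (by norm_num), if_neg (by norm_num), if_pos (by norm_num)]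
      rw [ssnLoop, if_neg (by simp [d6]), if_neg (by norm_num), if_neg (by norm_num), if_neg (by norm_num)]
      rw [ssnLoop, if_neg (by simp [d7]), if_neg (by norm_num), if_neg (by norm_num), if_neg (by norm_num)]
      rw [ssnLoop, if_neg (by simp [d8]), if_neg (by norm_num), if_neg (by norm_num), if_neg (by norm_num)]
      rw [ssnLoop, if_neg (by simp [d9]), if_neg (by norm_num), if_neg (by norm_num), if_neg (by norm_num)]
      rw [ssnLoop]
      simp [Bool.and_assoc, Bool.or_assoc]
    rw [hB]
    simp only [hsl1, hsl2, hsl3, List.length_cons, List.length_nil]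
    rw [if_neg (by norm_num)]
    by_cases p1 : ((PySem.Int.ofChars? [c1,c2,c3]).getD 0 = 0 ∨
        (PySem.Int.ofChars? [c1,c2,c3]).getD 0 = 666 ∨ 900 ≤ (PySem.Int.ofChars? [c1,c2,c3]).getD 0)
    · rw [if_pos p1]
      have : ((c1 == '0' && c2 == '0' && c3 == '0') || (c1 == '6' && c2 == '6' && c3 == '6')
          || (c1 == '9')) = true := by
        rw [← hA]; simp only [Bool.or_eq_true, beq_iff_eq, decide_eq_true_eq]
        exact or_assoc.mpr p1
      simp only [Bool.or_assoc] at this ⊢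
      rcases Bool.or_eq_true_iff.mp this with h | h
      · simp [h]
      · rcases Bool.or_eq_true_iff.mp h with h' | h' <;> simp [h']
    · rw [if_neg p1]
      have hAne : ((c1 == '0' && c2 == '0' && c3 == '0') || (c1 == '6' && c2 == '6' && c3 == '6')
          || (c1 == '9')) = false := by
        rw [← hA]
        push Not at p1
        simp only [Bool.or_eq_false_iff, beq_eq_false_iff_ne, ne_eq, decide_eq_false_iff_not,
          not_le]
        refine ⟨⟨p1.1, p1.2.1⟩, ?_⟩
        omega
      by_cases p2 : (PySem.Int.ofChars? [c4,c5]).getD 0 = 0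
      · rw [if_pos p2]
        have : (c4 == '0' && c5 == '0') = true := by rw [← hG]; simp [p2]
        simp [this]
      · rw [if_neg p2]
        have hGne : (c4 == '0' && c5 == '0') = false := by
          rw [← hG]; simp [p2]
        by_cases p3 : (PySem.Int.ofChars? [c6,c7,c8,c9]).getD 0 = 0
        · rw [if_pos p3]
          have : (c6 == '0' && c7 == '0' && c8 == '0' && c9 == '0') = true := by
            rw [← hS]; simp [p3]
          simp [this]
        · rw [if_neg p3]
          have hSne : (c6 == '0' && c7 == '0' && c8 == '0' && c9 == '0') = false := by
            rw [← hS]; simp [p3]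
          simp only [Bool.or_assoc] at hAne ⊢
          simp [Bool.or_eq_false_iff.mp hAne, hGne, hSne]
  · rw [if_pos h9]
    exact (ssnLoop_ne9 _ 0 true true false true true hdigit (by simpa using h9)).symm
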